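-- pv_equiv track=rewrite | github.com/msb-msb/mycoSwarm | src/mycoswarm/library.py | _sections_from_toc
-- ===== SOURCE A (Python) =====
-- def _sections_from_toc(
--     toc: list[tuple[int, str, int]],
--     page_texts: list[str],
--     text: str,
--     chunks: list[str],
-- ) -> list[str]:
--     """Map each chunk to a TOC section using page-based word offsets.
--
--     *toc* entries are ``(level, title, page)`` with 1-indexed pages.
--     *page_texts* is the per-page text list (0-indexed).
--     *text* and *chunks* are the cleaned/chunked versions used for indexing.
--     """
--     # Build a per-word section label from the TOC + page boundaries.
--     # Walk through page_texts, track cumulative word count, and assign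
--     # each word the TOC section that is active at that page.
--
--     # Sort TOC entries by page (stable — preserves order within a page)
--     sorted_toc = sorted(toc, key=lambda e: e[2])
--
--     # Build page → section title mapping.
--     # For each page, the active section is the *last* TOC entry whose
--     # page number is <= current page.
--     total_pages = len(page_texts)
--     page_section: list[str] = ["untitled"] * total_pages
--     current_title = "untitled"
--     toc_idx = 0
--     for page_num in range(1, total_pages + 1):  # 1-indexed
--         while toc_idx < len(sorted_toc) and sorted_toc[toc_idx][2] <= page_num:
--             current_title = sorted_toc[toc_idx][1]
--             toc_idx += 1
--         page_section[page_num - 1] = current_title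
--
--     # Build per-word heading array by walking page_texts.
--     word_headings: list[str] = []
--     for page_idx, pt in enumerate(page_texts):
--         section = page_section[page_idx]
--         for _ in pt.split():
--             word_headings.append(section)
--
--     # Match each chunk to the heading array using the same prefix-matching
--     # approach as _extract_pdf_sections / _extract_chunk_sections.
--     all_words = text.split()
--     sections: list[str] = []
--     search_from = 0
--     for chunk in chunks:
--         chunk_words = chunk.split()
--         if not chunk_words:
--             sections.append("untitled")
--             continue
--
--         prefix = chunk_words[:5]
--         found = False
--         for idx in range(search_from, len(all_words) - len(prefix) + 1):
--             if all_words[idx : idx + len(prefix)] == prefix: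
--                 sections.append(
--                     word_headings[idx] if idx < len(word_headings) else "untitled"
--                 )
--                 search_from = idx
--                 found = True
--                 break
--         if not found:
--             # Wrap-around search
--             for idx in range(0, len(all_words) - len(prefix) + 1):
--                 if all_words[idx : idx + len(prefix)] == prefix:
--                     sections.append(
--                         word_headings[idx]
--                         if idx < len(word_headings)
--                         else "untitled"
--                     )
--                     found = True
--                     break
--             if not found:
--                 sections.append("untitled")
--
--     return sections
-- ===== SOURCE B (Python) =====
-- def _sections_from_toc(
--     toc: list[tuple[int, str, int]],
--     page_texts: list[str],
--     text: str,
--     chunks: list[str],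
-- ) -> list[str]:
--     """Same result as A: a section label per chunk, via a precomputed
--     prefix-window index instead of repeated linear scans."""
--     total_pages = len(page_texts)
--     sorted_toc = sorted(toc, key=lambda e: e[2])
--
--     # Page -> section, filled segment by segment from the sorted TOC.
--     page_section: list[str] = []
--     cur = "untitled"
--     next_start = 1  # next 1-indexed page still to label
--     for _, title, p in sorted_toc:
--         s = min(max(p, next_start), total_pages + 1)
--         page_section.extend([cur] * (s - next_start))
--         cur = title
--         next_start = s
--     page_section.extend([cur] * (total_pages + 1 - next_start))
--
--     # Per-word heading array.
--     word_headings: list[str] = []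
--     for page_idx, pt in enumerate(page_texts):
--         word_headings.extend([page_section[page_idx]] * len(pt.split()))
--
--     # Index every word-window of length 1..5 to its (ascending) positions.
--     all_words = text.split()
--     n = len(all_words)
--     index: dict[tuple, list[int]] = {}
--     for L in range(1, 6):
--         for i in range(n - L + 1):
--             index.setdefault(tuple(all_words[i:i + L]), []).append(i)
--
--     sections: list[str] = []
--     search_from = 0
--     for chunk in chunks:
--         chunk_words = chunk.split()
--         if not chunk_words:
--             sections.append("untitled")
--             continue
--         pos = index.get(tuple(chunk_words[:5]), [])
--         if not pos:
--             sections.append("untitled")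
--             continue
--         j = None
--         for p in pos:
--             if p >= search_from:
--                 j = p
--                 break
--         if j is not None:
--             search_from = j
--         else:
--             j = pos[0]  # wrap-around: first occurrence overall
--         sections.append(word_headings[j] if j < len(word_headings) else "untitled")
--     return sections
-- ===== Notes on version B (the rewrite author's own statement) =====
-- stated objective: faster
-- what changed: B precomputes a dict mapping every word-window of length 1-5 to its ascending position list, so each chunk is matched by one lookup plus a scan of that (typically tiny) position list instead of A's linear forward-and-wrap scans over all words, and fills the page-to-section map segment by segment from the sorted TOC instead of A's per-page while-loop walk.
import Mathlib
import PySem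

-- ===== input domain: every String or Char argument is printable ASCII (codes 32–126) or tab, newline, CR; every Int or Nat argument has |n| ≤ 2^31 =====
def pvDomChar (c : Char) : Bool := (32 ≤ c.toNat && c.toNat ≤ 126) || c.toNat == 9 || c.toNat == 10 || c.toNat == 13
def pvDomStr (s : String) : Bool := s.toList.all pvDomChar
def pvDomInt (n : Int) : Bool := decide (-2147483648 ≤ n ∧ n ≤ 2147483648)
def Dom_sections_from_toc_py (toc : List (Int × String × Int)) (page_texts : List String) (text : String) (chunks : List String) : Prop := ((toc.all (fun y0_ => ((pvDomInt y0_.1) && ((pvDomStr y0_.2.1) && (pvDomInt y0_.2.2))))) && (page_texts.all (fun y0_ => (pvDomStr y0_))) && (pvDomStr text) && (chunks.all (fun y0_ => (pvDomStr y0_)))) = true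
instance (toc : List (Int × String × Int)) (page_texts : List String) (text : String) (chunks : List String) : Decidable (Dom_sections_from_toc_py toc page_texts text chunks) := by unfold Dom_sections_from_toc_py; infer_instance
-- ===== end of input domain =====

-- B replaces A's per-chunk linear scans over all words by a precomputed prefix-window
-- index (dict of word-window → ascending positions) and fills the page→section map
-- segment by segment from the sorted TOC; objective: faster chunk matching.

-- ===== PORT A =====

-- the inner `while toc_idx < len(sorted_toc) and sorted_toc[toc_idx][2] <= page_num`
-- loop (toc_idx advancing = consuming the remaining list)
def pvTocWhileA (rem : List (Int × String × Int)) (page_num : Int) (cur : String) : String × List (Int × String × Int) :=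
  match rem with
  | [] => (cur, [])
  | e :: rest => if e.2.2 ≤ page_num then pvTocWhileA rest page_num e.2.1 else (cur, e :: rest)

-- the `for page_num in range(1, total_pages + 1)` loop; the pre-sized list that A
-- assigns once per page in page order is built here by appending in the same order
def pvPageLoopA (sorted_toc : List (Int × String × Int)) (total_pages : Int) : List String :=
  ((PySem.List.pyRange 1 (total_pages + 1) 1).foldl
    (fun (st : List String × String × List (Int × String × Int)) page_num =>
      let r := pvTocWhileA st.2.2 page_num st.2.1
      (st.1 ++ [r.1], r.1, r.2)) ([], "untitled", sorted_toc)).1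

-- `for page_idx, pt in enumerate(page_texts): … for _ in pt.split(): word_headings.append(section)`
-- (page_section[page_idx] is always in range here, so pyGetD's default is never used)
def pvHeadingsA (page_texts page_section : List String) : List String :=
  (PySem.List.enumerate page_texts 0).foldl
    (fun wh p =>
      let sec := PySem.List.pyGetD page_section p.1 "untitled"
      (PySem.Str.split₀ p.2).foldl (fun wh _ => wh ++ [sec]) wh) []

-- `word_headings[idx] if idx < len(word_headings) else "untitled"` (idx ≥ 0 always)
def pvHeadA (word_headings : List String) (idx : Int) : String :=
  if idx < PySem.List.len word_headings then PySem.List.pyGetD word_headings idx "untitled" else "untitled"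

-- one iteration of the `for chunk in chunks` loop (state: sections so far, search_from)
def pvChunkStepA (all_words word_headings : List String) (st : List String × Int) (chunk : String) : List String × Int :=
  let cw := PySem.Str.split₀ chunk
  if cw = [] then (st.1 ++ ["untitled"], st.2)
  else
    let pre := PySem.List.slice cw none (some 5)
    let hi := PySem.List.len all_words - PySem.List.len pre + 1
    match (PySem.List.pyRange st.2 hi 1).find?
        (fun idx => PySem.List.slice all_words (some idx) (some (idx + PySem.List.len pre)) == pre) with
    | some idx => (st.1 ++ [pvHeadA word_headings idx], idx)
    | none =>
      match (PySem.List.pyRange 0 hi 1).find?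
          (fun idx => PySem.List.slice all_words (some idx) (some (idx + PySem.List.len pre)) == pre) with
      | some idx => (st.1 ++ [pvHeadA word_headings idx], st.2)
      | none => (st.1 ++ ["untitled"], st.2)

def sections_from_toc_py (toc : List (Int × String × Int)) (page_texts : List String) (text : String) (chunks : List String) : List String :=
  let sorted_toc := PySem.List.sorted toc (fun e => e.2.2) false
  let total_pages := PySem.List.len page_texts
  let page_section := pvPageLoopA sorted_toc total_pages
  let word_headings := pvHeadingsA page_texts page_section
  let all_words := PySem.Str.split₀ text
  (chunks.foldl (pvChunkStepA all_words word_headings) ([], 0)).1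

-- ===== PORT B =====

-- Source B's segment-filling loop body over the sorted TOC
def pvSegStepB (total : Int) (st : List String × String × Int) (e : Int × String × Int) : List String × String × Int :=
  let s := min (max e.2.2 st.2.2) (total + 1)
  (st.1 ++ PySem.List.pyRepeat [st.2.1] (s - st.2.2), e.2.1, s)

-- page → section filled segment by segment (Source B's first loop + the final extend)
def pvPageSecB (sorted_toc : List (Int × String × Int)) (total_pages : Int) : List String :=
  let seg := sorted_toc.foldl (pvSegStepB total_pages) ([], "untitled", 1)
  seg.1 ++ PySem.List.pyRepeat [seg.2.1] (total_pages + 1 - seg.2.2)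

-- `word_headings.extend([page_section[page_idx]] * len(pt.split()))`
def pvHeadingsB (page_texts page_section : List String) : List String :=
  (PySem.List.enumerate page_texts 0).foldl
    (fun wh p =>
      wh ++ PySem.List.pyRepeat [PySem.List.pyGetD page_section p.1 "untitled"]
        (PySem.List.len (PySem.Str.split₀ p.2))) []

-- `index.setdefault(tuple(all_words[i:i+L]), []).append(i)` = d[k] = d.get(k, []) + [i],
-- i.e. Dict.modify with default []
def pvIndexB (all_words : List String) : PySem.Dict (List String) (List Int) :=
  (PySem.List.pyRange 1 6 1).foldl
    (fun d L =>
      (PySem.List.pyRange 0 (PySem.List.len all_words - L + 1) 1).foldl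
        (fun (d : PySem.Dict (List String) (List Int)) i =>
          d.modify (PySem.List.slice all_words (some i) (some (i + L))) [] (· ++ [i])) d)
    PySem.Dict.empty

def pvHeadB (word_headings : List String) (idx : Int) : String :=
  if idx < PySem.List.len word_headings then PySem.List.pyGetD word_headings idx "untitled" else "untitled"

-- one iteration of Source B's `for chunk in chunks` loop
def pvChunkStepB (index : PySem.Dict (List String) (List Int)) (word_headings : List String)
    (st : List String × Int) (chunk : String) : List String × Int :=
  let cw := PySem.Str.split₀ chunk
  if cw = [] then (st.1 ++ ["untitled"], st.2)
  else
    let pos := index.getD (PySem.List.slice cw none (some 5)) []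
    match pos with
    | [] => (st.1 ++ ["untitled"], st.2)
    | p0 :: _ =>
      match pos.find? (fun p => st.2 ≤ p) with
      | some j => (st.1 ++ [pvHeadB word_headings j], j)
      | none => (st.1 ++ [pvHeadB word_headings p0], st.2)

def sections_from_toc_py_alt (toc : List (Int × String × Int)) (page_texts : List String) (text : String) (chunks : List String) : List String :=
  let total_pages := PySem.List.len page_texts
  let sorted_toc := PySem.List.sorted toc (fun e => e.2.2) false
  let page_section := pvPageSecB sorted_toc total_pages
  let word_headings := pvHeadingsB page_texts page_section
  let all_words := PySem.Str.split₀ text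
  let index := pvIndexB all_words
  (chunks.foldl (pvChunkStepB index word_headings) ([], 0)).1

-- ===== PRECONDITION & SPEC =====
def Spec_sections_from_toc_py (toc : List (Int × String × Int)) (page_texts : List String) (text : String) (chunks : List String) (out : List String) : Prop := out = sections_from_toc_py_alt toc page_texts text chunks
instance (toc : List (Int × String × Int)) (page_texts : List String) (text : String) (chunks : List String) (out : List String) : Decidable (Spec_sections_from_toc_py toc page_texts text chunks out) := by unfold Spec_sections_from_toc_py; infer_instance

-- ===== CLAIM (what is proved, stated in full; the proofs are below) =====
def Claim_equal_sections_from_toc_py : Prop := ∀ (toc : List (Int × String × Int)) (page_texts : List String) (text : String) (chunks : List String), Dom_sections_from_toc_py toc page_texts text chunks → Spec_sections_from_toc_py toc page_texts text chunks (sections_from_toc_py toc page_texts text chunks)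

-- ===== LEMMAS AND PROOFS =====

-- ---- phase 1: the page → section list ----

-- reference shape of the page→section labels from page lo on, consuming the remaining TOC
def pvBuild (total : Int) : List (Int × String × Int) → String → Int → List String
  | [], cur, lo => List.replicate (total + 1 - lo).toNat cur
  | e :: rest, cur, lo =>
    List.replicate (min (max e.2.2 lo) (total + 1) - lo).toNat cur ++
      pvBuild total rest e.2.1 (min (max e.2.2 lo) (total + 1))

theorem pvBuild_past (total : Int) (rem : List (Int × String × Int)) :
    ∀ (cur : String) (lo : Int), total + 1 ≤ lo → pvBuild total rem cur lo = [] := by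
  induction rem with
  | nil => intro cur lo h; simp [pvBuild]; omega
  | cons e rest ih =>
      intro cur lo h
      have hs : min (max e.2.2 lo) (total + 1) = total + 1 := by omega
      simp only [pvBuild, hs]
      rw [show (total + 1 - lo).toNat = 0 by omega]
      simp [ih _ _ (by omega : total + 1 ≤ total + 1)]

theorem pvBuild_cons_page (total : Int) (rem : List (Int × String × Int)) :
    ∀ (cur : String) (lo : Int), lo ≤ total →
      pvBuild total rem cur lo =
        (pvTocWhileA rem lo cur).1 ::
          pvBuild total (pvTocWhileA rem lo cur).2 (pvTocWhileA rem lo cur).1 (lo + 1) := by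
  induction rem with
  | nil =>
      intro cur lo h
      simp only [pvBuild, pvTocWhileA]
      rw [show (total + 1 - lo).toNat = ((total + 1 - (lo + 1)).toNat + 1) by omega]
      simp [List.replicate_succ]
  | cons e rest ih =>
      intro cur lo h
      by_cases hp : e.2.2 ≤ lo
      · have hs : min (max e.2.2 lo) (total + 1) = lo := by omega
        simp only [pvBuild, pvTocWhileA, if_pos hp, hs, sub_self, Int.toNat_zero,
          List.replicate_zero, List.nil_append]
        exact ih _ _ h
      · have hmax : max e.2.2 lo = e.2.2 := by omega
        have hmax' : max e.2.2 (lo + 1) = e.2.2 := by omega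
        have hrep : (min e.2.2 (total + 1) - lo).toNat = (min e.2.2 (total + 1) - (lo + 1)).toNat + 1 := by omega
        simp only [pvBuild, pvTocWhileA, if_neg hp, hmax, hmax', hrep, List.replicate_succ]
        simp

theorem pvPageLoopA_fold (total : Int) (k : Nat) :
    ∀ (lo : Int) (acc : List String) (cur : String) (rem : List (Int × String × Int)),
      total + 1 - lo = (k : Int) →
      ((PySem.List.pyRange lo (total + 1) 1).foldl
        (fun (st : List String × String × List (Int × String × Int)) page_num =>
          let r := pvTocWhileA st.2.2 page_num st.2.1
          (st.1 ++ [r.1], r.1, r.2)) (acc, cur, rem)).1 = acc ++ pvBuild total rem cur lo := by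
  induction k with
  | zero =>
      intro lo acc cur rem h
      have hlo : lo = total + 1 := by omega
      rw [PySem.List.pyRange_one_eq_nil (by omega)]
      simp [hlo, pvBuild_past total rem cur (total + 1) (by omega)]
  | succ k ih =>
      intro lo acc cur rem h
      rw [PySem.List.pyRange_one_cons (by omega)]
      simp only [List.foldl_cons]
      rw [ih (lo + 1) _ _ _ (by omega)]
      rw [pvBuild_cons_page total rem cur lo (by omega)]
      simp

theorem pvPageSecB_fold (total : Int) (rem : List (Int × String × Int)) :
    ∀ (acc : List String) (cur : String) (lo : Int),
      (rem.foldl (pvSegStepB total) (acc, cur, lo)).1 ++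
        PySem.List.pyRepeat [(rem.foldl (pvSegStepB total) (acc, cur, lo)).2.1]
          (total + 1 - (rem.foldl (pvSegStepB total) (acc, cur, lo)).2.2)
      = acc ++ pvBuild total rem cur lo := by
  induction rem with
  | nil => intro acc cur lo; simp [pvBuild, PySem.List.pyRepeat_singleton]
  | cons e rest ih =>
      intro acc cur lo
      simp only [List.foldl_cons, pvSegStepB]
      rw [ih]
      simp [pvBuild, PySem.List.pyRepeat_singleton]

theorem pageSec_eq (sorted_toc : List (Int × String × Int)) (total : Int) (h : 0 ≤ total) :
    pvPageLoopA sorted_toc total = pvPageSecB sorted_toc total := by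
  unfold pvPageLoopA
  rw [pvPageLoopA_fold total total.toNat 1 [] "untitled" sorted_toc (by omega)]
  simp only [pvPageSecB]
  rw [← pvPageSecB_fold total sorted_toc [] "untitled" 1]

-- ---- phase 2: the per-word heading list ----

theorem headings_eq (page_texts page_section : List String) :
    pvHeadingsA page_texts page_section = pvHeadingsB page_texts page_section := by
  unfold pvHeadingsA pvHeadingsB
  apply PySem.List.foldl_congr_mem
  intro acc p _
  simp only []
  rw [PySem.List.foldl_append_singleton_eq_map]
  simp [PySem.List.pyRepeat_singleton, PySem.List.len_eq, List.map_const']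

-- ---- phase 3: the chunk-matching loop ----

-- the ascending position list that the index stores under the key `pre`
def pvOcc (ws pre : List String) : List Int :=
  (PySem.List.pyRange 0 (PySem.List.len ws - (pre.length : Int) + 1) 1).filter
    (fun i => PySem.List.slice ws (some i) (some (i + (pre.length : Int))) == pre)

theorem pvSlice_len (ws : List String) (i L : Int) (h0 : 0 ≤ i) (hL : 0 ≤ L)
    (hle : i + L ≤ PySem.List.len ws) :
    (PySem.List.slice ws (some i) (some (i + L))).length = L.toNat := by
  rw [PySem.List.slice_toNat ws h0 (by omega)]
  simp only [PySem.List.len_eq] at hle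
  simp only [List.length_take, List.length_drop]
  omega

theorem pvPass_getD (ws : List String) (d : PySem.Dict (List String) (List Int)) (L : Int)
    (k : List String) :
    ((PySem.List.pyRange 0 (PySem.List.len ws - L + 1) 1).foldl
      (fun (d : PySem.Dict (List String) (List Int)) i =>
        d.modify (PySem.List.slice ws (some i) (some (i + L))) [] (· ++ [i])) d).getD k []
    = d.getD k [] ++
      (PySem.List.pyRange 0 (PySem.List.len ws - L + 1) 1).filter
        (fun i => PySem.List.slice ws (some i) (some (i + L)) == k) := by
  have h := PySem.Dict.getD_foldl_modify_append
      ((PySem.List.pyRange 0 (PySem.List.len ws - L + 1) 1).map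
        (fun i => (PySem.List.slice ws (some i) (some (i + L)), i))) d k
  rw [List.foldl_map] at h
  simpa [List.filter_map, List.map_map, Function.comp_def, List.map_id'] using h

theorem pvIndex_getD (ws k : List String) (h1 : 1 ≤ k.length) (h5 : k.length ≤ 5) :
    (pvIndexB ws).getD k [] = pvOcc ws k := by
  have hrange : PySem.List.pyRange 1 6 1 = [1, 2, 3, 4, 5] := by decide
  have hnil : ∀ L : Int, 0 ≤ L → L ≠ (k.length : Int) →
      (PySem.List.pyRange 0 (PySem.List.len ws - L + 1) 1).filter
        (fun i => PySem.List.slice ws (some i) (some (i + L)) == k) = [] := by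
    intro L hL hne
    rw [List.filter_eq_nil_iff]
    intro i hi
    rw [PySem.List.mem_pyRange_one] at hi
    simp only [beq_iff_eq]
    intro hEq
    apply hne
    have hl := congrArg List.length hEq
    rw [pvSlice_len ws i L hi.1 hL (by simp only [PySem.List.len_eq] at hi ⊢; omega)] at hl
    omega
  have hk : ∀ L : Int, L = (k.length : Int) →
      (PySem.List.pyRange 0 (PySem.List.len ws - L + 1) 1).filter
        (fun i => PySem.List.slice ws (some i) (some (i + L)) == k) = pvOcc ws k := by
    intro L hL; rw [hL]; rfl
  unfold pvIndexB
  rw [hrange]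
  simp only [List.foldl_cons, List.foldl_nil]
  rw [pvPass_getD, pvPass_getD, pvPass_getD, pvPass_getD, pvPass_getD]
  rw [PySem.Dict.getD_empty]
  set m := k.length with hm
  interval_cases m
  · rw [hnil 2 (by norm_num) (by norm_num), hnil 3 (by norm_num) (by norm_num),
        hnil 4 (by norm_num) (by norm_num), hnil 5 (by norm_num) (by norm_num),
        hk 1 (by norm_num)]
    simp
  · rw [hnil 1 (by norm_num) (by norm_num), hnil 3 (by norm_num) (by norm_num),
        hnil 4 (by norm_num) (by norm_num), hnil 5 (by norm_num) (by norm_num),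
        hk 2 (by norm_num)]
    simp
  · rw [hnil 1 (by norm_num) (by norm_num), hnil 2 (by norm_num) (by norm_num),
        hnil 4 (by norm_num) (by norm_num), hnil 5 (by norm_num) (by norm_num),
        hk 3 (by norm_num)]
    simp
  · rw [hnil 1 (by norm_num) (by norm_num), hnil 2 (by norm_num) (by norm_num),
        hnil 3 (by norm_num) (by norm_num), hnil 5 (by norm_num) (by norm_num),
        hk 4 (by norm_num)]
    simp
  · rw [hnil 1 (by norm_num) (by norm_num), hnil 2 (by norm_num) (by norm_num),
        hnil 3 (by norm_num) (by norm_num), hnil 4 (by norm_num) (by norm_num),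
        hk 5 (by norm_num)]
    simp

theorem pvFind_all_true {α : Type} (l : List α) (q : α → Bool) (h : ∀ x ∈ l, q x = true) :
    l.find? q = l.head? := by
  cases l with
  | nil => rfl
  | cons x t => simp [h x (by simp)]

theorem pvFind_forward (p : Int → Bool) (lo hi : Int) (h0 : 0 ≤ lo) :
    (PySem.List.pyRange lo hi 1).find? p
      = ((PySem.List.pyRange 0 hi 1).filter p).find? (fun i => decide (lo ≤ i)) := by
  by_cases hle : lo ≤ hi
  · rw [PySem.List.pyRange_one_append 0 lo hi h0 hle, List.filter_append, List.find?_append]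
    have h1 : (((PySem.List.pyRange 0 lo 1).filter p).find? (fun i => decide (lo ≤ i))) = none := by
      rw [List.find?_eq_none]
      intro x hx
      have hx2 := (List.mem_filter.mp hx).1
      rw [PySem.List.mem_pyRange_one] at hx2
      simp; omega
    rw [h1]
    simp only [Option.none_or]
    rw [← List.head?_filter]
    symm
    apply pvFind_all_true
    intro x hx
    have hx2 := (List.mem_filter.mp hx).1
    rw [PySem.List.mem_pyRange_one] at hx2
    simp; omega
  · rw [PySem.List.pyRange_one_eq_nil (by omega)]
    simp only [List.find?_nil]
    symm
    rw [List.find?_eq_none]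
    intro x hx
    have hx2 := (List.mem_filter.mp hx).1
    rw [PySem.List.mem_pyRange_one] at hx2
    simp; omega

theorem pvFind_wrap (p : Int → Bool) (hi : Int) :
    (PySem.List.pyRange 0 hi 1).find? p = ((PySem.List.pyRange 0 hi 1).filter p).head? :=
  (List.head?_filter).symm

theorem pvHead_eq : pvHeadA = pvHeadB := rfl

theorem chunkStep_eq (aw wh : List String) (st : List String × Int) (c : String) (h0 : 0 ≤ st.2) :
    pvChunkStepA aw wh st c = pvChunkStepB (pvIndexB aw) wh st c ∧
      0 ≤ (pvChunkStepA aw wh st c).2 := by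
  by_cases hcw : PySem.Str.split₀ c = []
  · refine ⟨by simp [pvChunkStepA, pvChunkStepB, hcw], ?_⟩
    simp [pvChunkStepA, hcw]
    exact h0
  · have hpos : 0 < (PySem.Str.split₀ c).length := List.length_pos_of_ne_nil hcw
    have hlen1 : 1 ≤ (PySem.List.slice (PySem.Str.split₀ c) none (some 5)).length := by
      rw [PySem.List.slice_to _ (by norm_num)]
      simp [List.length_take]
      omega
    have hlen5 : (PySem.List.slice (PySem.Str.split₀ c) none (some 5)).length ≤ 5 := by
      rw [PySem.List.slice_to _ (by norm_num)]
      simp [List.length_take]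
    have hocc := pvIndex_getD aw _ hlen1 hlen5
    simp only [pvOcc, PySem.List.len_eq] at hocc
    simp only [pvChunkStepA, pvChunkStepB, if_neg hcw, PySem.List.len_eq]
    rw [pvFind_forward _ st.2 _ h0, pvFind_wrap]
    rw [← hocc]
    cases hx : (pvIndexB aw).getD (PySem.List.slice (PySem.Str.split₀ c) none (some 5)) [] with
    | nil =>
        exact ⟨by simp, by simpa using h0⟩
    | cons p0 rest =>
        cases hf : List.find? (fun p => decide (st.2 ≤ p)) (p0 :: rest) with
        | some j =>
            have hj : 0 ≤ j := by
              have hmem := List.mem_of_find?_eq_some hf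
              have hmem' : j ∈ (pvIndexB aw).getD (PySem.List.slice (PySem.Str.split₀ c) none (some 5)) [] := by
                rw [hx]; exact hmem
              rw [hocc] at hmem'
              have hmem2 := (List.mem_filter.mp hmem').1
              rw [PySem.List.mem_pyRange_one] at hmem2
              omega
            exact ⟨by simp [pvHead_eq], by simpa using hj⟩
        | none =>
            exact ⟨by simp [pvHead_eq], by simpa using h0⟩

theorem chunks_fold_eq (aw wh : List String) (chunks : List String) :
    ∀ (st : List String × Int), 0 ≤ st.2 →
      chunks.foldl (pvChunkStepA aw wh) st = chunks.foldl (pvChunkStepB (pvIndexB aw) wh) st := by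
  induction chunks with
  | nil => intro st _; rfl
  | cons c rest ih =>
      intro st h0
      simp only [List.foldl_cons]
      obtain ⟨heq, hpos⟩ := chunkStep_eq aw wh st c h0
      rw [← heq]
      exact ih _ hpos

-- ===== VERDICT (by name: the statement is the Claim_ definition above) =====
theorem sections_from_toc_py_spec : Claim_equal_sections_from_toc_py := by
  intro toc page_texts text chunks _
  show sections_from_toc_py toc page_texts text chunks = sections_from_toc_py_alt toc page_texts text chunks
  simp only [sections_from_toc_py, sections_from_toc_py_alt]
  rw [pageSec_eq _ _ (by simp only [PySem.List.len_eq]; omega)]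
  rw [headings_eq]
  rw [chunks_fold_eq _ _ chunks ([], 0) (by norm_num)]
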